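-- pv_equiv track=rewrite | github.com/datakind/edvise | src/edvise/genai/schema_mapping_agent/transformation/eval.py | _mapping_overlap_metrics
-- ===== SOURCE A (Python) =====
-- def _mapping_overlap_metrics(gold_mapping: dict | None, pred_mapping: dict | None) -> tuple[int | None, int | None]:
--     if gold_mapping is None:
--         return None, None
--     gold_mapping = gold_mapping or {}
--     pred_mapping = pred_mapping or {}
--     if not gold_mapping:
--         return 1, 1 if not pred_mapping else 0
--     overlap_keys = set(gold_mapping).intersection(set(pred_mapping))
--     key_recall = int(len(overlap_keys) == len(gold_mapping))
--     value_correct = int(all(pred_mapping.get(k) == gold_mapping.get(k) for k in overlap_keys) and len(overlap_keys) == len(gold_mapping))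
--     return key_recall, value_correct
-- ===== SOURCE B (Python) =====
-- def _mapping_overlap_metrics(gold_mapping, pred_mapping):
--     if gold_mapping is None:
--         return None, None
--     gold_mapping = gold_mapping or {}
--     pred_mapping = pred_mapping or {}
--     if not gold_mapping:
--         return 1, 1 if not pred_mapping else 0
--     _MISSING = object()
--     missing = 0
--     wrong = 0
--     for k, v in gold_mapping.items():
--         p = pred_mapping.get(k, _MISSING)
--         if p is _MISSING:
--             missing += 1
--             wrong += 1
--         elif p != v:
--             wrong += 1
--     return int(missing == 0), int(wrong == 0)
-- ===== Notes on version B (the rewrite author's own statement) =====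
-- stated objective: alternative
-- what changed: Replaces A's two-stage set machinery (building set intersection, comparing lengths, then a second generator pass over the overlap) with one fused loop over gold items that counts missing keys and wrong values in integer accumulators, deriving both metrics from the counters.
import Mathlib
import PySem

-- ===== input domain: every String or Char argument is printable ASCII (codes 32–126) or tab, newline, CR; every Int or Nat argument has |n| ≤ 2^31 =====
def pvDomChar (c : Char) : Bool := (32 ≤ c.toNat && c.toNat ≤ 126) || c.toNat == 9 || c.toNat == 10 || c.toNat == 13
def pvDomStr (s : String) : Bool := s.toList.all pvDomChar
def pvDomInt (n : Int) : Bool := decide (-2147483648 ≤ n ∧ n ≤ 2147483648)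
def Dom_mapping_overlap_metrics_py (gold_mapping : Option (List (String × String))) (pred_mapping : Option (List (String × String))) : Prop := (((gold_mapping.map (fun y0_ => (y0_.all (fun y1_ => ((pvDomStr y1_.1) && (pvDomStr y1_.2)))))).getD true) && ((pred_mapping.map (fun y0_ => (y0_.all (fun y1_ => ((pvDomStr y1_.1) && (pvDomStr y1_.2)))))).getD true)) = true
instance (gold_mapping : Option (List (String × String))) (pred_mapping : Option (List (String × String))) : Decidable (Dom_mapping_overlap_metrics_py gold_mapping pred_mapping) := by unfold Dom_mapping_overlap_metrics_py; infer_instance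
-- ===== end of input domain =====

-- B replaces A's set-intersection/length-comparison machinery with one fused counting loop over gold items (alternative decomposition, same result).

-- ===== PORT A =====
-- set(gold).intersection(set(pred)) taken in gold-key order (only its length and membership are used by A)
def mapping_overlap_metrics_py (gold_mapping : Option (List (String × String))) (pred_mapping : Option (List (String × String))) : Option Int × Option Int :=
  match gold_mapping with
  | none => (none, none)
  | some g =>
    let gd : PySem.Dict String String := PySem.Dict.ofList g
    let pd : PySem.Dict String String := PySem.Dict.ofList (pred_mapping.getD [])
    if gd.size = 0 then
      (some 1, some (if pd.size = 0 then 1 else 0))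
    else
      let overlap_keys := gd.keys.filter (fun k => pd.contains k)
      let key_recall : Int := if overlap_keys.length = gd.size then 1 else 0
      let value_correct : Int :=
        if overlap_keys.all (fun k => pd.get? k == gd.get? k) && decide (overlap_keys.length = gd.size) then 1 else 0
      (some key_recall, some value_correct)

-- ===== PORT B =====
-- pred_mapping.get(k, _MISSING) is pd.get? kv.1 : none plays the sentinel (values are real Strings, never none)
def mapping_overlap_metrics_py_alt (gold_mapping : Option (List (String × String))) (pred_mapping : Option (List (String × String))) : Option Int × Option Int :=
  match gold_mapping with
  | none => (none, none)
  | some g =>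
    let gd : PySem.Dict String String := PySem.Dict.ofList g
    let pd : PySem.Dict String String := PySem.Dict.ofList (pred_mapping.getD [])
    if gd.size = 0 then
      (some 1, some (if pd.size = 0 then 1 else 0))
    else
      let counts : Nat × Nat := gd.items.foldl (fun acc kv =>
        match pd.get? kv.1 with
        | none => (acc.1 + 1, acc.2 + 1)
        | some p => if p ≠ kv.2 then (acc.1, acc.2 + 1) else acc) (0, 0)
      (some (if counts.1 = 0 then 1 else 0), some (if counts.2 = 0 then 1 else 0))

-- ===== PRECONDITION & SPEC =====
def Spec_mapping_overlap_metrics_py (gold_mapping : Option (List (String × String))) (pred_mapping : Option (List (String × String))) (out : Option Int × Option Int) : Prop := out = mapping_overlap_metrics_py_alt gold_mapping pred_mapping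
instance (gold_mapping : Option (List (String × String))) (pred_mapping : Option (List (String × String))) (out : Option Int × Option Int) : Decidable (Spec_mapping_overlap_metrics_py gold_mapping pred_mapping out) := by unfold Spec_mapping_overlap_metrics_py; infer_instance

-- ===== CLAIM (what is proved, stated in full; the proofs are below) =====
def Claim_equal_mapping_overlap_metrics_py : Prop := ∀ (gold_mapping : Option (List (String × String))) (pred_mapping : Option (List (String × String))), Dom_mapping_overlap_metrics_py gold_mapping pred_mapping → Spec_mapping_overlap_metrics_py gold_mapping pred_mapping (mapping_overlap_metrics_py gold_mapping pred_mapping)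

-- ===== LEMMAS AND PROOFS =====

-- the fused counting loop computes the two countP's
lemma pv_fold_counts (pd : PySem.Dict String String) (l : List (String × String)) (a b : Nat) :
    l.foldl (fun acc kv =>
        match pd.get? kv.1 with
        | none => (acc.1 + 1, acc.2 + 1)
        | some p => if p ≠ kv.2 then (acc.1, acc.2 + 1) else acc) (a, b)
      = (a + l.countP (fun kv => (pd.get? kv.1).isNone),
         b + l.countP (fun kv => !(pd.get? kv.1 == some kv.2))) := by
  induction l generalizing a b with
  | nil => simp
  | cons kv t ih =>
    cases h : pd.get? kv.1 with
    | none =>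
      simp only [List.foldl_cons, h, ih, List.countP_cons]
      simp [Prod.ext_iff]
      omega
    | some p =>
      by_cases hp : p = kv.2
      · subst hp
        simp only [List.foldl_cons, h, ih, List.countP_cons]
        simp
      · simp only [List.foldl_cons, h, ih, List.countP_cons]
        simp [hp, Prod.ext_iff]
        omega

lemma pv_filter_len_iff (gd pd : PySem.Dict String String) :
    ((gd.keys.filter (fun k => pd.contains k)).length = gd.size) ↔
      gd.keys.all (fun k => pd.contains k) = true := by
  have hsz : gd.size = gd.keys.length := by
    simp [PySem.Dict.size, PySem.Dict.keys]
  rw [hsz, List.length_filter_eq_length_iff, List.all_eq_true]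

lemma pv_missing_iff (gd pd : PySem.Dict String String) :
    (gd.items.countP (fun kv => (pd.get? kv.1).isNone) = 0) ↔
      gd.keys.all (fun k => pd.contains k) = true := by
  rw [List.countP_eq_zero, List.all_eq_true]
  constructor
  · intro h k hk
    have : k ∈ gd.items.map (·.1) := by simpa [PySem.Dict.keys] using hk
    obtain ⟨kv, hkv, hfst⟩ := List.mem_map.mp this
    subst hfst
    have := h kv hkv
    rw [PySem.Dict.contains_eq_isSome_get?, Option.isSome_iff_ne_none]
    simpa using this
  · intro h kv hkv
    have hk : kv.1 ∈ gd.keys := PySem.Dict.mem_keys_of_mem_items gd hkv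
    have := h kv.1 hk
    rw [PySem.Dict.contains_eq_isSome_get?, Option.isSome_iff_ne_none] at this
    simpa using this

lemma pv_wrong_iff (gd pd : PySem.Dict String String) :
    (gd.items.countP (fun kv => !(pd.get? kv.1 == some kv.2)) = 0) ↔
      gd.items.all (fun kv => pd.get? kv.1 == some kv.2) = true := by
  rw [List.countP_eq_zero, List.all_eq_true]
  constructor
  · intro h kv hkv; have := h kv hkv; simpa using this
  · intro h kv hkv; simpa using h kv hkv

-- A's value-correct condition, given full key overlap, is the per-item equality over gold items
lemma pv_values_iff (gd pd : PySem.Dict String String) (hnd : gd.keys.Nodup)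
    (hall : gd.keys.all (fun k => pd.contains k) = true) :
    ((gd.keys.filter (fun k => pd.contains k)).all (fun k => pd.get? k == gd.get? k) = true) ↔
      gd.items.all (fun kv => pd.get? kv.1 == some kv.2) = true := by
  rw [List.all_eq_true] at hall
  rw [List.filter_eq_self.mpr hall]
  simp only [List.all_eq_true]
  constructor
  · intro h kv hkv
    have hk : kv.1 ∈ gd.keys := PySem.Dict.mem_keys_of_mem_items gd hkv
    have hg : gd.get? kv.1 = some kv.2 :=
      PySem.Dict.get?_of_mem_items (d := gd) hkv hnd
    have := h kv.1 hk
    rw [hg] at this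
    exact this
  · intro h k hk
    have : k ∈ gd.items.map (·.1) := by simpa [PySem.Dict.keys] using hk
    obtain ⟨kv, hkv, hfst⟩ := List.mem_map.mp this
    have hg : gd.get? kv.1 = some kv.2 :=
      PySem.Dict.get?_of_mem_items (d := gd) hkv hnd
    subst hfst
    rw [hg]
    exact h kv hkv

-- if some gold key misses pred, the per-item equality fails too
lemma pv_not_all_wrong (gd pd : PySem.Dict String String)
    (hall : ¬ gd.keys.all (fun k => pd.contains k) = true) :
    ¬ gd.items.all (fun kv => pd.get? kv.1 == some kv.2) = true := by
  intro hc
  apply hall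
  rw [List.all_eq_true] at hc ⊢
  intro k hk
  have : k ∈ gd.items.map (·.1) := by simpa [PySem.Dict.keys] using hk
  obtain ⟨kv, hkv, hfst⟩ := List.mem_map.mp this
  subst hfst
  have := hc kv hkv
  rw [PySem.Dict.contains_eq_isSome_get?]
  have : pd.get? kv.1 = some kv.2 := by simpa using this
  simp [this]

-- ===== VERDICT (by name: the statement is the Claim_ definition above) =====
theorem mapping_overlap_metrics_py_spec : Claim_equal_mapping_overlap_metrics_py := by
  intro gold pred _
  unfold Spec_mapping_overlap_metrics_py mapping_overlap_metrics_py mapping_overlap_metrics_py_alt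
  cases gold with
  | none => rfl
  | some g =>
    dsimp only
    set gd : PySem.Dict String String := PySem.Dict.ofList g with hgd
    set pd : PySem.Dict String String := PySem.Dict.ofList (pred.getD []) with hpd
    have hnd : gd.keys.Nodup := PySem.Dict.nodup_keys_ofList g
    by_cases hz : gd.size = 0
    · simp [hz]
    · simp only [if_neg hz]
      rw [pv_fold_counts pd gd.items 0 0]
      simp only [Nat.zero_add]
      by_cases hall : gd.keys.all (fun k => pd.contains k) = true
      · have hlen : (gd.keys.filter (fun k => pd.contains k)).length = gd.size :=
          (pv_filter_len_iff gd pd).mpr hall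
        have hmiss : gd.items.countP (fun kv => (pd.get? kv.1).isNone) = 0 :=
          (pv_missing_iff gd pd).mpr hall
        refine Prod.ext ?_ ?_
        · simp [hlen, hmiss]
        · simp only [hlen, decide_true, Bool.and_true]
          by_cases hvv : (gd.keys.filter (fun k => pd.contains k)).all (fun k => pd.get? k == gd.get? k) = true
          · have := (pv_values_iff gd pd hnd hall).mp hvv
            have hw : gd.items.countP (fun kv => !(pd.get? kv.1 == some kv.2)) = 0 :=
              (pv_wrong_iff gd pd).mpr this
            simp [hvv, hw]
          · have hw : ¬ gd.items.countP (fun kv => !(pd.get? kv.1 == some kv.2)) = 0 := by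
              intro hc
              exact hvv ((pv_values_iff gd pd hnd hall).mpr ((pv_wrong_iff gd pd).mp hc))
            simp [hvv, hw]
      · have hlen : ¬ (gd.keys.filter (fun k => pd.contains k)).length = gd.size :=
          fun hc => hall ((pv_filter_len_iff gd pd).mp hc)
        have hmiss : ¬ gd.items.countP (fun kv => (pd.get? kv.1).isNone) = 0 :=
          fun hc => hall ((pv_missing_iff gd pd).mp hc)
        have hw : ¬ gd.items.countP (fun kv => !(pd.get? kv.1 == some kv.2)) = 0 := by
          intro hc
          exact pv_not_all_wrong gd pd hall ((pv_wrong_iff gd pd).mp hc)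
        refine Prod.ext ?_ ?_
        · simp [hlen, hmiss]
        · have hcf : ((gd.keys.filter (fun k => pd.contains k)).all (fun k => pd.get? k == gd.get? k)
              && decide ((gd.keys.filter (fun k => pd.contains k)).length = gd.size)) = false := by
            simp [hlen]
          rw [hcf]
          simp [hw]
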